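-- pv_equiv track=rewrite | github.com/Naico17/subasta_acciones | src/recursivo.py | max_profit_recursive
-- ===== SOURCE A (Python) =====
-- def max_profit_recursive(i, shares, l, u, p):
--     """
--     Versión recursiva pura.
--
--     i : cantidad de oferentes considerados (1..N)
--     shares : acciones disponibles para repartir (0..A)
--     """
--     # Caso base: no hay oferentes o no hay acciones
--     if i == 0 or shares == 0:
--         return 0
--
--     # Opción 1: no asignar acciones al oferente i
--     best = max_profit_recursive(i - 1, shares, l, u, p)
--
--     # Opción 2: asignar x acciones al oferente i-1
--     min_i = l[i - 1]
--     max_i = u[i - 1]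
--
--     if shares >= min_i:
--         upper_limit = min(max_i, shares)
--         for x in range(min_i, upper_limit + 1):
--             value = p[i - 1] * x + max_profit_recursive(i - 1, shares - x, l, u, p)
--             if value > best:
--                 best = value
--
--     return best
-- ===== SOURCE B (Python) =====
-- def max_profit_recursive(i, shares, l, u, p):
--     memo = {}
--
--     def solve(bs, s):
--         # bs holds the remaining bidders, last bidder first
--         if not bs or s == 0:
--             return 0
--         key = (len(bs), s)
--         if key not in memo:
--             lo, hi, price = bs[0]
--             rest = bs[1:]
--             options = [solve(rest, s)]
--             if s >= lo:
--                 options.extend(price * x + solve(rest, s - x)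
--                                for x in range(lo, min(hi, s) + 1))
--             memo[key] = max(options)
--         return memo[key]
--
--     bidders = list(zip(l[:i], u[:i], p[:i]))
--     bidders.reverse()
--     return solve(bidders, shares)
-- ===== Notes on version B (the rewrite author's own statement) =====
-- stated objective: alternative
-- what changed: B zips the three bidder lists into one reversed list of (lo, hi, price) triples and recurses over that list structure, memoizing each (remaining-bidders, shares) state in a dictionary and taking max() over a built option list, instead of A's pure index recursion with a running-max loop that recomputes states exponentially often.
-- outside the precondition, e.g. on max_profit_recursive(1, 5, [9], [9], []): A returns 0, B returns 0
import Mathlib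
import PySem

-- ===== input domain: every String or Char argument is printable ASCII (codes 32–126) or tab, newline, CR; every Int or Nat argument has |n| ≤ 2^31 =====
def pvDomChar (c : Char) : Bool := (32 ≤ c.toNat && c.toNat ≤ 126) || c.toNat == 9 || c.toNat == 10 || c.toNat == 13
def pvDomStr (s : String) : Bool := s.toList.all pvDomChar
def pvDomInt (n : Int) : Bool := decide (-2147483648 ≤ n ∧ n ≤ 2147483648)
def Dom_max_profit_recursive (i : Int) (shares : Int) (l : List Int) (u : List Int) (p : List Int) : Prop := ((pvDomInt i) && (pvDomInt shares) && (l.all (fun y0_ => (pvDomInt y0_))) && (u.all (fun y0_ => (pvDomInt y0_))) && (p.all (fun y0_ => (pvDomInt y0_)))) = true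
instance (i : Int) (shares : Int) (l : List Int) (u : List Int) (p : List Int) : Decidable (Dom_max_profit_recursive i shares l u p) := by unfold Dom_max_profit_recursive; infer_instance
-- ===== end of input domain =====

-- B zips the three bidder lists into one reversed list of (lo, hi, price) triples and recurses over
-- that list with memoized subproblem values, instead of A's pure index recursion that recomputes states.
-- ===== PORT A =====
-- A's loop 'for x in range(min_i, upper_limit+1)' with the recursive call inside.
def loopA (f : Int → Int) (pi_ shares : Int) : List Int → Int → Int
  | [], best => best
  | x :: xs, best =>
      let value := pi_ * x + f (shares - x)
      loopA f pi_ shares xs (if value > best then value else best)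

-- A's recursion, indexed by the Nat value of i (Python diverges for i < 0; Pre_ requires 0 ≤ i).
def goA (l u p : List Int) : Nat → Int → Int
  | 0, _ => 0
  | n+1, shares =>
      if shares == 0 then 0
      else
        let best := goA l u p n shares
        let min_i := PySem.List.pyGetD l (n : Int) 0
        let max_i := PySem.List.pyGetD u (n : Int) 0
        if shares ≥ min_i then
          loopA (fun s => goA l u p n s) (PySem.List.pyGetD p (n : Int) 0) shares
            (PySem.List.pyRange min_i (min max_i shares + 1) 1) best
        else best

def max_profit_recursive (i : Int) (shares : Int) (l : List Int) (u : List Int) (p : List Int) : Int :=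
  -- the 'i ≤ 0' guard only makes the port total: Python recurses without bound for i < 0 (excluded by Pre_)
  if i ≤ 0 then 0 else goA l u p i.toNat shares

-- ===== PORT B =====
-- the generator inside 'options.extend(...)', threading the memo through the recursive calls
def optsB (f : Int → PySem.Dict (Int × Int) Int → Int × PySem.Dict (Int × Int) Int)
    (price s : Int) : List Int → PySem.Dict (Int × Int) Int → List Int × PySem.Dict (Int × Int) Int
  | [], m => ([], m)
  | x :: xs, m =>
      let r := f (s - x) m
      let t := optsB f price s xs r.2
      ((price * x + r.1) :: t.1, t.2)

-- B's 'solve' over the reversed triple list, with memo keyed by (len(bs), s)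
def solveB : List (Int × Int × Int) → Int → PySem.Dict (Int × Int) Int → Int × PySem.Dict (Int × Int) Int
  | [], _, m => (0, m)
  | (lo, hi, price) :: rest, s, m =>
      if s == 0 then (0, m)
      else
        match m.get? ((rest.length : Int) + 1, s) with
        | some v => (v, m)
        | none =>
          let r0 := solveB rest s m
          let t :=
            if s ≥ lo then
              optsB (fun s' m' => solveB rest s' m') price s
                (PySem.List.pyRange lo (min hi s + 1) 1) r0.2
            else ([], r0.2)
          let best := (PySem.List.max? (r0.1 :: t.1) (fun y => y)).getD 0
          (best, t.2.insert ((rest.length : Int) + 1, s) best)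

def max_profit_recursive_alt (i : Int) (shares : Int) (l : List Int) (u : List Int) (p : List Int) : Int :=
  let bidders := ((PySem.List.slice l none (some i)).zip
      ((PySem.List.slice u none (some i)).zip (PySem.List.slice p none (some i)))).reverse
  (solveB bidders shares PySem.Dict.empty).1

-- ===== PRECONDITION & SPEC =====
-- Pre_ excludes i < 0 (Python A recurses without bound there, RecursionError) and, unless a base case
-- (i == 0 or shares == 0) answers immediately, indices past the end of l/u/p (IndexError). It is slightly
-- narrower than A's exact returning set: A can also return with a too-short p when the inner loop guard
-- never fires, or with short lists when deeper shares hit 0; those degenerate short-list inputs are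
-- excluded for a simple closed form (A and B behave alike there).
def Pre_max_profit_recursive (i : Int) (shares : Int) (l : List Int) (u : List Int) (p : List Int) : Prop :=
  0 ≤ i ∧ (i = 0 ∨ shares = 0 ∨
    (i ≤ (l.length : Int) ∧ i ≤ (u.length : Int) ∧ i ≤ (p.length : Int)))
instance (i : Int) (shares : Int) (l : List Int) (u : List Int) (p : List Int) : Decidable (Pre_max_profit_recursive i shares l u p) := by unfold Pre_max_profit_recursive; infer_instance
def pvWitness_max_profit_recursive : Int × Int × List Int × List Int × List Int := (2, 3, [0, 1], [2, 2], [5, 7])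

def Spec_max_profit_recursive (i : Int) (shares : Int) (l : List Int) (u : List Int) (p : List Int) (out : Int) : Prop := out = max_profit_recursive_alt i shares l u p
instance (i : Int) (shares : Int) (l : List Int) (u : List Int) (p : List Int) (out : Int) : Decidable (Spec_max_profit_recursive i shares l u p out) := by unfold Spec_max_profit_recursive; infer_instance

-- ===== CLAIM (what is proved, stated in full; the proofs are below) =====
def Claim_equal_max_profit_recursive : Prop := ∀ (i : Int) (shares : Int) (l : List Int) (u : List Int) (p : List Int), Dom_max_profit_recursive i shares l u p → Pre_max_profit_recursive i shares l u p → Spec_max_profit_recursive i shares l u p (max_profit_recursive i shares l u p)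

-- ===== LEMMAS AND PROOFS =====

-- the zipped prefix of the three lists: B's 'bidders' before the reversal, cut at n
def pref (l u p : List Int) (n : Nat) : List (Int × Int × Int) :=
  (l.take n).zip ((u.take n).zip (p.take n))

theorem length_pref (l u p : List Int) (n : Nat)
    (hl : n ≤ l.length) (hu : n ≤ u.length) (hp : n ≤ p.length) :
    (pref l u p n).length = n := by
  simp [pref]; omega

theorem pref_succ (l u p : List Int) (n : Nat)
    (hl : n < l.length) (hu : n < u.length) (hp : n < p.length) :
    pref l u p (n+1) = pref l u p n ++ [(l[n], u[n], p[n])] := by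
  have e1 : l.take (n+1) = l.take n ++ [l[n]] := by
    rw [List.take_add_one, List.getElem?_eq_getElem hl]; rfl
  have e2 : u.take (n+1) = u.take n ++ [u[n]] := by
    rw [List.take_add_one, List.getElem?_eq_getElem hu]; rfl
  have e3 : p.take (n+1) = p.take n ++ [p[n]] := by
    rw [List.take_add_one, List.getElem?_eq_getElem hp]; rfl
  unfold pref
  rw [e1, e2, e3, List.zip_append (by simp; omega), List.zip_append (by simp; omega)]
  rfl

-- Invariant: every memo entry (j, s) ↦ v records the value of A's recursion at that state.
def Good (l u p : List Int) (m : PySem.Dict (Int × Int) Int) : Prop :=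
  ∀ j s v, m.get? (j, s) = some v → v = goA l u p j.toNat s

theorem good_empty (l u p : List Int) : Good l u p PySem.Dict.empty := by
  intro j s v h
  simp [PySem.Dict.get?_empty] at h

-- A's running-max loop is a fold of max over the candidate values
theorem loopA_eq_foldl (f : Int → Int) (pi_ shares : Int) :
    ∀ (xs : List Int) (best : Int),
      loopA f pi_ shares xs best = (xs.map (fun x => pi_ * x + f (shares - x))).foldl max best := by
  intro xs
  induction xs with
  | nil => intro best; simp [loopA]
  | cons x xs ih =>
      intro best
      have : (if pi_ * x + f (shares - x) > best then pi_ * x + f (shares - x) else best)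
          = max best (pi_ * x + f (shares - x)) := by
        rw [max_def]; split_ifs <;> omega
      simp [loopA, ih, this]

theorem optsB_eq (l u p : List Int)
    (f : Int → PySem.Dict (Int × Int) Int → Int × PySem.Dict (Int × Int) Int) (g : Int → Int)
    (price s : Int)
    (hf : ∀ s' m, Good l u p m → (f s' m).1 = g s' ∧ Good l u p (f s' m).2) :
    ∀ (xs : List Int) (m : PySem.Dict (Int × Int) Int), Good l u p m →
      (optsB f price s xs m).1 = xs.map (fun x => price * x + g (s - x)) ∧
      Good l u p (optsB f price s xs m).2 := by
  intro xs
  induction xs with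
  | nil => intro m hm; simpa [optsB] using hm
  | cons x xs ih =>
      intro m hm
      obtain ⟨h1, h2⟩ := hf (s - x) m hm
      obtain ⟨h3, h4⟩ := ih _ h2
      exact ⟨by simp [optsB, h1, h3], by simpa [optsB] using h4⟩

theorem solveB_eq (l u p : List Int) :
    ∀ (n : Nat), n ≤ l.length → n ≤ u.length → n ≤ p.length →
    ∀ (s : Int) (m : PySem.Dict (Int × Int) Int), Good l u p m →
      (solveB (pref l u p n).reverse s m).1 = goA l u p n s ∧
      Good l u p (solveB (pref l u p n).reverse s m).2 := by
  intro n
  induction n with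
  | zero => intro _ _ _ s m hm; simpa [pref, solveB, goA] using hm
  | succ n ih =>
      intro hl hu hp s m hm
      have hl' : n < l.length := by omega
      have hu' : n < u.length := by omega
      have hp' : n < p.length := by omega
      have hrev : (pref l u p (n+1)).reverse = (l[n], u[n], p[n]) :: (pref l u p n).reverse := by
        rw [pref_succ l u p n hl' hu' hp']; simp
      have hlen : ((pref l u p n).reverse).length = n := by
        rw [List.length_reverse]; exact length_pref l u p n (by omega) (by omega) (by omega)
      have hgl : PySem.List.pyGetD l (n : Int) 0 = l[n] := by
        simp [PySem.List.pyGetD_natCast, List.getD_eq_getElem?_getD, List.getElem?_eq_getElem hl']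
      have hgu : PySem.List.pyGetD u (n : Int) 0 = u[n] := by
        simp [PySem.List.pyGetD_natCast, List.getD_eq_getElem?_getD, List.getElem?_eq_getElem hu']
      have hgp : PySem.List.pyGetD p (n : Int) 0 = p[n] := by
        simp [PySem.List.pyGetD_natCast, List.getD_eq_getElem?_getD, List.getElem?_eq_getElem hp']
      rw [hrev]
      by_cases hs : s == 0
      · have hs' : s = 0 := by simpa using hs
        subst hs'
        constructor
        · simp [solveB, goA]
        · simpa [solveB] using hm
      · have hsgoal : goA l u p (n+1) s =
            (if s ≥ l[n] then
              loopA (fun s' => goA l u p n s') p[n] s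
                (PySem.List.pyRange l[n] (min u[n] s + 1) 1) (goA l u p n s)
            else goA l u p n s) := by
          simp only [goA]
          rw [if_neg (show ¬((s == 0) = true) from hs), hgl, hgu, hgp]
        rcases hk : m.get? ((((pref l u p n).reverse).length : Int) + 1, s) with _ | v
        · -- memo miss: compute and record
          obtain ⟨h01, h02⟩ := ih (by omega) (by omega) (by omega) s m hm
          by_cases hge : s ≥ l[n]
          · obtain ⟨o1, o2⟩ := optsB_eq l u p (fun s' m' => solveB ((pref l u p n).reverse) s' m')
              (goA l u p n) p[n] s
              (fun s' m' hm' => ih (by omega) (by omega) (by omega) s' m' hm')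
              (PySem.List.pyRange l[n] (min u[n] s + 1) 1)
              (solveB ((pref l u p n).reverse) s m).2 h02
            have hbest :
                (PySem.List.max? ((solveB ((pref l u p n).reverse) s m).1 ::
                    (optsB (fun s' m' => solveB ((pref l u p n).reverse) s' m') p[n] s
                      (PySem.List.pyRange l[n] (min u[n] s + 1) 1)
                      (solveB ((pref l u p n).reverse) s m).2).1) (fun y => y)).getD 0
                  = goA l u p (n+1) s := by
              rw [PySem.List.max?_id_cons, Option.getD_some, o1, h01, hsgoal, if_pos hge,
                loopA_eq_foldl]
            constructor
            · simp only [solveB, hs, Bool.false_eq_true, if_false, hk, if_pos hge]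
              exact hbest
            · simp only [solveB, hs, Bool.false_eq_true, if_false, hk, if_pos hge]
              intro j s' v hjv
              rw [PySem.Dict.get?_insert] at hjv
              by_cases heq : ((j, s') : Int × Int) = ((((pref l u p n).reverse).length : Int) + 1, s)
              · rw [if_pos heq] at hjv
                obtain ⟨hj, hsx⟩ : j = (((pref l u p n).reverse).length : Int) + 1 ∧ s' = s := by
                  simpa using heq
                subst hj; subst hsx
                have hjn : ((((pref l u p n).reverse).length : Int) + 1).toNat = n + 1 := by
                  rw [hlen]; omega
                rw [hjn, ← hbest]
                exact (Option.some.inj hjv).symm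
              · rw [if_neg heq] at hjv
                exact o2 j s' v hjv
          · have hbest :
                (PySem.List.max? ([(solveB ((pref l u p n).reverse) s m).1] ++ []) (fun y => y)).getD 0
                  = goA l u p (n+1) s := by
              rw [List.append_nil, show ([(solveB ((pref l u p n).reverse) s m).1] =
                (solveB ((pref l u p n).reverse) s m).1 :: []) from rfl,
                PySem.List.max?_id_cons, Option.getD_some, h01, hsgoal, if_neg hge]
              simp
            constructor
            · simp only [solveB, hs, Bool.false_eq_true, if_false, hk, if_neg hge]
              simpa using hbest
            · simp only [solveB, hs, Bool.false_eq_true, if_false, hk, if_neg hge]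
              intro j s' v hjv
              rw [PySem.Dict.get?_insert] at hjv
              by_cases heq : ((j, s') : Int × Int) = ((((pref l u p n).reverse).length : Int) + 1, s)
              · rw [if_pos heq] at hjv
                obtain ⟨hj, hsx⟩ : j = (((pref l u p n).reverse).length : Int) + 1 ∧ s' = s := by
                  simpa using heq
                subst hj; subst hsx
                have hjn : ((((pref l u p n).reverse).length : Int) + 1).toNat = n + 1 := by
                  rw [hlen]; omega
                rw [hjn, ← hbest]
                simp at hjv ⊢
                omega
              · rw [if_neg heq] at hjv
                exact h02 j s' v hjv
        · -- memo hit
          have hv := hm ((((pref l u p n).reverse).length : Int) + 1) s v hk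
          have hjn : ((((pref l u p n).reverse).length : Int) + 1).toNat = n + 1 := by
            rw [hlen]; omega
          rw [hjn] at hv
          constructor
          · simp only [solveB, hs, Bool.false_eq_true, if_false, hk]
            exact hv.symm ▸ rfl
          · simp only [solveB, hs, Bool.false_eq_true, if_false, hk]
            exact hm

-- both programs answer 0 when shares == 0, with no bound on the lists needed
theorem goA_zero (l u p : List Int) : ∀ n : Nat, goA l u p n 0 = 0 := by
  intro n; cases n <;> simp [goA]

theorem solveB_zero (bs : List (Int × Int × Int)) (m : PySem.Dict (Int × Int) Int) :
    (solveB bs 0 m).1 = 0 := by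
  cases bs with
  | nil => simp [solveB]
  | cons b rest => obtain ⟨lo, hi, price⟩ := b; simp [solveB]

-- ===== VERDICT (by name: the statement is the Claim_ definition above) =====
theorem max_profit_recursive_spec : Claim_equal_max_profit_recursive := by
  intro i shares l u p _ hpre
  obtain ⟨hi, hcases⟩ := hpre
  unfold Spec_max_profit_recursive max_profit_recursive max_profit_recursive_alt
  have hslice : ∀ xs : List Int, PySem.List.slice xs none (some i) = xs.take i.toNat :=
    fun xs => PySem.List.slice_to xs hi
  by_cases h : i ≤ 0
  · have : i = 0 := le_antisymm h hi
    subst this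
    simp [hslice, solveB]
  · simp only [h, if_false, hslice]
    rcases hcases with h0 | hsh | ⟨hbl, hbu, hbp⟩
    · omega
    · subst hsh
      rw [goA_zero, solveB_zero]
    · have hbl' : i.toNat ≤ l.length := by omega
      have hbu' : i.toNat ≤ u.length := by omega
      have hbp' : i.toNat ≤ p.length := by omega
      exact ((solveB_eq l u p i.toNat hbl' hbu' hbp' shares PySem.Dict.empty
        (good_empty l u p)).1).symm
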